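-- pv_equiv track=rewrite | github.com/futurecore/revelation | revelation/gdb/gdb.py | unescape
-- ===== SOURCE A (Python) =====
-- def _unpack(data):
--     """Manually unpack string data as bytes.
--     Should be equivalent to this CPython:
--         fmt = str(len(data)) + 'B'
--         data = unpack(fmt, data)
--     """
--     unpacked = []
--     for character in data:
--         unpacked.append(ord(character))
--     return unpacked
--
-- def unescape(data):
--     """Decode binary packets with escapes."""
--     unpacked_data = _unpack(data)
--     esc_found = False
--     raw_data = []
--     for byte in unpacked_data:
--         if esc_found:
--             raw_data.append(byte ^ 0x20)
--             esc_found = False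
--         elif byte == 0x7d:
--             esc_found = True
--         else:
--             raw_data.append(byte)
--     result = ''
--     for byte in raw_data:
--         result += str(byte)
--     return result
-- ===== SOURCE B (Python) =====
-- def unescape(data):
--     """Decode binary packets with escapes, by splitting on the 0x7d marker.
--
--     Each '}' in the data starts an escape: split the string on '}' and walk the
--     parts.  A nonempty part after a separator has its first character XOR-ed with
--     0x20; an empty part means the following separator '}' was itself the escaped
--     byte, so emit 0x7d ^ 0x20 and take the next part literally; a trailing empty
--     part is a dangling escape and is dropped.
--     """
--     parts = data.split('}')
--     pieces = [''.join(str(ord(c)) for c in parts[0])]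
--     i = 1
--     n = len(parts)
--     while i < n:
--         part = parts[i]
--         if part:
--             pieces.append(str(ord(part[0]) ^ 0x20))
--             pieces.append(''.join(str(ord(c)) for c in part[1:]))
--             i += 1
--         elif i + 1 < n:
--             pieces.append(str(0x7d ^ 0x20))
--             pieces.append(''.join(str(ord(c)) for c in parts[i + 1]))
--             i += 2
--         else:
--             i += 1
--     return ''.join(pieces)
-- ===== Notes on version B (the rewrite author's own statement) =====
-- stated objective: alternative
-- what changed: Replaces A's three passes with byte-level escape-flag tracking by a split of the string on the '}' marker followed by a walk over the parts list that decodes each part's leading character (consuming two parts when an empty part marks an escaped '}' itself), with no per-character escape flag, no _unpack helper and no separate stringify loop.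
import Mathlib
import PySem

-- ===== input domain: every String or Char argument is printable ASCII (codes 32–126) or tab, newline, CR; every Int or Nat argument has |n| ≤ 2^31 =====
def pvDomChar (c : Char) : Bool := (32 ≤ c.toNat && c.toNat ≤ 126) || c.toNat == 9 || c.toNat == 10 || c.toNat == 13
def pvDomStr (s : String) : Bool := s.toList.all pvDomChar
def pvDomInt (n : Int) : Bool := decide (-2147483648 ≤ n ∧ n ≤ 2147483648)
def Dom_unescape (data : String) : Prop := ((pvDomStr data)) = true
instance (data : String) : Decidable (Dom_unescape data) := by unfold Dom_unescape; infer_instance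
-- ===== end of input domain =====

-- B splits the input on the '}' escape marker and decodes part by part instead of A's
-- three per-byte passes with an escape flag; same return value.

-- ===== PORT A =====
-- _unpack: loop appending ord(character)
def pyUnpack (data : String) : List Int :=
  data.toList.foldl (fun acc c => acc ++ [(c.toNat : Int)]) []

def unescape (data : String) : String :=
  let unpacked := pyUnpack data
  let st := unpacked.foldl
    (fun (s : Bool × List Int) (byte : Int) =>
      if s.1 then (false, s.2 ++ [PySem.Int.bxor byte 32])
      else if byte = 125 then (true, s.2)
      else (s.1, s.2 ++ [byte]))
    (false, ([] : List Int))
  st.2.foldl (fun r byte => r ++ PySem.Int.toStr byte) ""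

-- ===== PORT B =====
-- ''.join(str(ord(c)) for c in p)
def decPart (p : List Char) : String :=
  PySem.Str.join "" (p.map (fun c => PySem.Int.toStr (c.toNat : Int)))

-- the while loop over parts[1:], two parts consumed when an empty part marks an escaped '}'
def altParts : List (List Char) → List String → List String
  | [], pieces => pieces
  | p :: rest, pieces =>
    match p with
    | c :: tl =>
      altParts rest (pieces ++ [PySem.Int.toStr (PySem.Int.bxor (c.toNat : Int) 32), decPart tl])
    | [] =>
      match rest with
      | [] => pieces
      | q :: rest' =>
        altParts rest' (pieces ++ [PySem.Int.toStr (PySem.Int.bxor 125 32), decPart q])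

def unescape_alt (data : String) : String :=
  match data.toList.splitOn '}' with
  | [] => ""   -- unreachable: split always yields at least one part
  | p0 :: rest => PySem.Str.join "" (decPart p0 :: altParts rest [])

-- ===== PRECONDITION & SPEC =====
def Spec_unescape (data : String) (out : String) : Prop := out = unescape_alt data
instance (data : String) (out : String) : Decidable (Spec_unescape data out) := by unfold Spec_unescape; infer_instance

-- ===== CLAIM (what is proved, stated in full; the proofs are below) =====
def Claim_equal_unescape : Prop := ∀ (data : String), Dom_unescape data → Spec_unescape data (unescape data)

-- ===== LEMMAS AND PROOFS =====

-- the raw decoded byte list, as a common spine for both ports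
def rawList : List Char → List Int
  | [] => []
  | c :: rest =>
    if (c.toNat : Int) = 125 then
      match rest with
      | [] => []
      | d :: rest' => PySem.Int.bxor (d.toNat : Int) 32 :: rawList rest'
    else (c.toNat : Int) :: rawList rest

-- the raw bytes contributed by the parts after the first one
def rawTail : List (List Char) → List Int
  | [] => []
  | (c :: tl) :: rest => PySem.Int.bxor (c.toNat : Int) 32 :: tl.map (fun c => (c.toNat : Int)) ++ rawTail rest
  | [] :: [] => []
  | [] :: q :: rest' => PySem.Int.bxor 125 32 :: q.map (fun c => (c.toNat : Int)) ++ rawTail rest'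

theorem pyUnpack_eq (data : String) : pyUnpack data = data.toList.map (fun c => (c.toNat : Int)) := by
  have h : ∀ (l : List Char) (acc : List Int),
      l.foldl (fun acc c => acc ++ [(c.toNat : Int)]) acc = acc ++ l.map (fun c => (c.toNat : Int)) := by
    intro l
    induction l with
    | nil => simp
    | cons c t ih => intro acc; simp [ih]
  simpa [pyUnpack] using h data.toList []

theorem foldA_eq (l : List Char) : ∀ raw : List Int,
    ((l.map (fun c => (c.toNat : Int))).foldl
      (fun (s : Bool × List Int) (byte : Int) =>
        if s.1 then (false, s.2 ++ [PySem.Int.bxor byte 32])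
        else if byte = 125 then (true, s.2)
        else (s.1, s.2 ++ [byte]))
      (false, raw)).2 = raw ++ rawList l := by
  induction l using rawList.induct with
  | case1 => simp [rawList]
  | case2 c hc => intro raw; simp [rawList, hc]
  | case3 c hc d t ih => intro raw; simp [rawList, hc, ih, List.append_assoc]
  | case4 c t hc ih =>
    intro raw
    simp only [List.map_cons, List.foldl_cons, if_neg hc, Bool.false_eq_true, if_false, ih]
    conv_rhs => rw [rawList.eq_def]
    simp [hc, List.append_assoc]

theorem join_empty_flatten : ∀ ls : List (List Char), PySem.Chars.join [] ls = ls.flatten := by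
  intro ls
  induction ls with
  | nil => simp [PySem.Chars.join_nil]
  | cons a t ih =>
    cases t with
    | nil => simp [PySem.Chars.join_singleton]
    | cons b t' => simp [PySem.Chars.join_cons_cons, ih]

theorem stringify_toList (L : List Int) : ∀ s : String,
    (L.foldl (fun r byte => r ++ PySem.Int.toStr byte) s).toList
      = s.toList ++ (L.map (fun b => (PySem.Int.toStr b).toList)).flatten := by
  induction L with
  | nil => intro s; simp
  | cons b t ih => intro s; simp [ih, List.append_assoc]

theorem decPart_toList (p : List Char) :
    (decPart p).toList = (p.map (fun c => ((PySem.Int.toStr (c.toNat : Int)).toList))).flatten := by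
  simp [decPart, PySem.Str.join, join_empty_flatten, Function.comp_def]

theorem char_eq_brace_iff (c : Char) : ((c.toNat : Int) = 125) ↔ c = '}' := by
  constructor
  · intro h
    have hn : c.toNat = 125 := by exact_mod_cast h
    exact Char.ext (UInt32.toNat_inj.mp (hn.trans rfl))
  · intro h; subst h; rfl

theorem splitOn_ne_nil (l : List Char) : l.splitOn '}' ≠ [] := by
  induction l with
  | nil => simp [List.splitOn]
  | cons c t ih =>
    rw [List.splitOn, List.splitOnP_cons]
    split
    · simp
    · rw [List.splitOn] at ih
      cases h : t.splitOnP (· == '}') with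
      | nil => exact absurd h ih
      | cons a b => simp

-- the split of the input reconstructs the raw byte list part by part
theorem splitOn_rawList (l : List Char) :
    (match l.splitOn '}' with
     | [] => []
     | p0 :: rest => p0.map (fun c => (c.toNat : Int)) ++ rawTail rest) = rawList l := by
  induction l using rawList.induct with
  | case1 => simp [List.splitOn, rawList, rawTail]
  | case2 c hc =>
    have hcb : c = '}' := (char_eq_brace_iff c).mp hc
    subst hcb
    rfl
  | case3 c hc d t ih =>
    have hcb : c = '}' := (char_eq_brace_iff c).mp hc
    subst hcb
    rw [List.splitOn, List.splitOnP_cons]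
    simp only [beq_self_eq_true, if_true]
    by_cases hd : d = '}'
    · subst hd
      rw [List.splitOnP_cons]
      simp only [beq_self_eq_true, if_true]
      obtain ⟨h, tail, hsp⟩ : ∃ h tail, t.splitOn '}' = h :: tail := by
        cases hx : t.splitOn '}' with
        | nil => exact absurd hx (splitOn_ne_nil t)
        | cons a b => exact ⟨a, b, rfl⟩
      rw [List.splitOn] at hsp
      rw [hsp]
      rw [List.splitOn, hsp] at ih
      conv_rhs => rw [rawList.eq_def]
      simp only [show ((('}' : Char).toNat : Int) = 125) from rfl, if_true]
      rw [← ih]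
      simp [rawTail]
    · have hdm : ¬ ((d.toNat : Int) = 125) := fun h => hd ((char_eq_brace_iff d).mp h)
      rw [List.splitOnP_cons]
      simp only [beq_iff_eq, if_neg hd]
      obtain ⟨h, tail, hsp⟩ : ∃ h tail, t.splitOn '}' = h :: tail := by
        cases hx : t.splitOn '}' with
        | nil => exact absurd hx (splitOn_ne_nil t)
        | cons a b => exact ⟨a, b, rfl⟩
      rw [List.splitOn] at hsp
      rw [hsp]
      rw [List.splitOn, hsp] at ih
      conv_rhs => rw [rawList.eq_def]
      simp only [show ((('}' : Char).toNat : Int) = 125) from rfl, reduceIte]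
      rw [← ih]
      simp [rawTail]
  | case4 c t hc ih =>
    have hcb : c ≠ '}' := fun h => hc ((char_eq_brace_iff c).mpr h)
    rw [List.splitOn, List.splitOnP_cons]
    simp only [beq_iff_eq, if_neg hcb]
    obtain ⟨h, tail, hsp⟩ : ∃ h tail, t.splitOn '}' = h :: tail := by
      cases hx : t.splitOn '}' with
      | nil => exact absurd hx (splitOn_ne_nil t)
      | cons a b => exact ⟨a, b, rfl⟩
    rw [List.splitOn] at hsp
    rw [hsp]
    rw [List.splitOn, hsp] at ih
    conv_rhs => rw [rawList.eq_def]
    simp only [if_neg hc]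
    rw [← ih]
    simp

-- the part loop of B, flattened to char lists
theorem altParts_flatten (rest : List (List Char)) : ∀ acc : List String,
    ((altParts rest acc).map String.toList).flatten
      = (acc.map String.toList).flatten
        ++ ((rawTail rest).map (fun b => (PySem.Int.toStr b).toList)).flatten := by
  induction rest using rawTail.induct with
  | case1 => simp [altParts, rawTail]
  | case2 c tl rest ih =>
    intro acc
    rw [altParts, ih]
    simp [rawTail, decPart_toList, List.flatten_append, List.append_assoc, Function.comp_def]
  | case3 => intro acc; simp [altParts, rawTail]
  | case4 q rest' ih =>
    intro acc
    rw [altParts.eq_def]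
    simp only []
    rw [ih]
    simp [rawTail, decPart_toList, List.flatten_append, List.append_assoc, Function.comp_def]

theorem alt_toList (data : String) :
    (unescape_alt data).toList
      = ((rawList data.toList).map (fun b => (PySem.Int.toStr b).toList)).flatten := by
  unfold unescape_alt
  rw [← splitOn_rawList data.toList]
  obtain ⟨p0, rest, hsp⟩ : ∃ p0 rest, data.toList.splitOn '}' = p0 :: rest := by
    cases hx : data.toList.splitOn '}' with
    | nil => exact absurd hx (splitOn_ne_nil data.toList)
    | cons a b => exact ⟨a, b, rfl⟩
  rw [hsp, PySem.Str.toList_join,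
      show ("" : String).toList = [] from rfl, join_empty_flatten]
  rw [List.map_cons, List.flatten_cons, altParts_flatten rest [], decPart_toList]
  simp [List.map_append, List.flatten_append, List.map_map, Function.comp_def]

-- ===== VERDICT (by name: the statement is the Claim_ definition above) =====
theorem unescape_spec : Claim_equal_unescape := by
  intro data _
  unfold Spec_unescape
  apply String.toList_inj.mp
  rw [alt_toList]
  unfold unescape
  simp only [pyUnpack_eq, foldA_eq, List.nil_append]
  simpa using stringify_toList (rawList data.toList) ""
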